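-- pv_equiv track=rewrite | github.com/uldaman/bet-server | src/vechain/decoder/translator.py | get_size
-- ===== SOURCE A (Python) =====
-- def get_size(typ):
--     base, sub, arrlist = typ
--     if not len(arrlist):
--         if base in ('string', 'bytes') and not sub:
--             return None
--         return 32
--     if arrlist[-1] == []:
--         return None
--     o = get_size((base, sub, arrlist[:-1]))
--     if o is None:
--         return None
--     return arrlist[-1][0] * o
-- ===== SOURCE B (Python) =====
-- def get_size(typ):
--     base, sub, arrlist = typ
--     size = None if base in ('string', 'bytes') and not sub else 32
--     for entry in arrlist:
--         if entry == []:
--             return None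
--         if size is not None:
--             size *= entry[0]
--     return size
-- ===== Notes on version B (the rewrite author's own statement) =====
-- stated objective: simpler
-- what changed: Replaced the back-to-front recursion with slice copies by a single forward loop over arrlist that multiplies an accumulator (None propagates), using commutativity of multiplication.
import Mathlib
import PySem

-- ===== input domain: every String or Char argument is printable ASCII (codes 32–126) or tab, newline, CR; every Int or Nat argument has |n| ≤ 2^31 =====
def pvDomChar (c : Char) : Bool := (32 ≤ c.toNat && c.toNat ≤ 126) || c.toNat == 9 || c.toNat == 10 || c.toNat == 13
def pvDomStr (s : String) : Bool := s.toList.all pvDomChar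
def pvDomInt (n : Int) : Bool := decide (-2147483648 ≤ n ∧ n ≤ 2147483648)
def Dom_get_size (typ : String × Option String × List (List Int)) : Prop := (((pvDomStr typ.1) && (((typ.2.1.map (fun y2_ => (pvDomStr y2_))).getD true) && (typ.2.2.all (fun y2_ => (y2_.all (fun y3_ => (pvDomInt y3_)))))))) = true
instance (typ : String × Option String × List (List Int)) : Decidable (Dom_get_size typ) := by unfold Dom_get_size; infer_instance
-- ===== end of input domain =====

-- B replaces A's back-to-front recursion (which copies arrlist[:-1] at each step) by one
-- forward loop multiplying an accumulator; objective: simpler.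

-- ===== PORT A =====
-- literal port of A: recursion on the triple, peeling arrlist[:-1] from the back
def get_size (typ : String × Option String × List (List Int)) : Option Int :=
  match typ with
  | (base, sub, arrlist) =>
    if _h : arrlist.length = 0 then
      if (base = "string" ∨ base = "bytes") ∧ (sub = none ∨ sub = some "") then none
      else some 32
    else if PySem.List.pyGet? arrlist (-1) = some [] then none
    else
      match get_size (base, sub, PySem.List.slice arrlist none (some (-1))) with
      | none => none
      | some o =>
        match PySem.List.pyGet? arrlist (-1) with
        | some last =>
          match PySem.List.pyGet? last 0 with
          | some x => some (x * o)
          | none => none   -- unreachable: last ≠ []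
        | none => none     -- unreachable: arrlist ≠ []
termination_by typ.2.2.length
decreasing_by
  simp [PySem.List.slice_to_neg_one]
  omega

-- ===== PORT B =====
-- the for-loop of Source B: early return on entry == [], else multiply the accumulator
def get_size_alt_loop (size : Option Int) : List (List Int) → Option Int
  | [] => size
  | entry :: rest =>
    if entry = [] then none
    else
      get_size_alt_loop
        (match size with
         | none => none
         | some s =>
           match PySem.List.pyGet? entry 0 with
           | some x => some (s * x)
           | none => none)   -- unreachable: entry ≠ []
        rest

def get_size_alt (typ : String × Option String × List (List Int)) : Option Int :=
  match typ with
  | (base, sub, arrlist) =>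
    let size : Option Int :=
      if (base = "string" ∨ base = "bytes") ∧ (sub = none ∨ sub = some "") then none
      else some 32
    get_size_alt_loop size arrlist

-- ===== PRECONDITION & SPEC =====
def Spec_get_size (typ : String × Option String × List (List Int)) (out : Option Int) : Prop := out = get_size_alt typ
instance (typ : String × Option String × List (List Int)) (out : Option Int) : Decidable (Spec_get_size typ out) := by unfold Spec_get_size; infer_instance

-- ===== CLAIM (what is proved, stated in full; the proofs are below) =====
def Claim_equal_get_size : Prop := ∀ (typ : String × Option String × List (List Int)), Dom_get_size typ → Spec_get_size typ (get_size typ)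

-- ===== LEMMAS AND PROOFS =====

-- common characterisation: none iff some entry is [] (or the base size is none), else size * product of the heads
def pvProdHeads (l : List (List Int)) : Int := (l.map (fun e => e.headD 0)).prod

def pvSpecFun (size : Option Int) (l : List (List Int)) : Option Int :=
  if l.any (fun e => decide (e = [])) then none
  else match size with
       | none => none
       | some s => some (s * pvProdHeads l)

theorem pvGet0_cons (x : Int) (xs : List Int) :
    PySem.List.pyGet? (x :: xs) 0 = some x := by
  simp [PySem.List.pyGet?, PySem.List.pyIdx?]

theorem alt_loop_eq_spec (size : Option Int) (l : List (List Int)) :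
    get_size_alt_loop size l = pvSpecFun size l := by
  induction l generalizing size with
  | nil =>
    cases size <;> simp [get_size_alt_loop, pvSpecFun, pvProdHeads]
  | cons e rest ih =>
    by_cases he : e = []
    · subst he; simp [get_size_alt_loop, pvSpecFun]
    · obtain ⟨x, xs, rfl⟩ : ∃ x xs, e = x :: xs := by
        cases e with
        | nil => exact absurd rfl he
        | cons a b => exact ⟨a, b, rfl⟩
      cases size with
      | none =>
        simp [get_size_alt_loop, he, ih, pvSpecFun]
      | some s =>
        simp only [get_size_alt_loop, if_neg he, pvGet0_cons, ih, pvSpecFun]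
        by_cases hr : rest.any (fun e => decide (e = [])) <;>
          simp [hr, pvProdHeads, mul_assoc]

theorem a_eq_spec (base : String) (sub : Option String) (l : List (List Int)) :
    get_size (base, sub, l) =
      pvSpecFun (if (base = "string" ∨ base = "bytes") ∧ (sub = none ∨ sub = some "") then none
                 else some 32) l := by
  induction l using List.reverseRecOn with
  | nil =>
    by_cases hb : (base = "string" ∨ base = "bytes") ∧ (sub = none ∨ sub = some "") <;>
      simp [get_size, pvSpecFun, pvProdHeads, hb]
  | append_singleton l e ih =>
    rw [get_size]
    have hlen : (l ++ [e]).length ≠ 0 := by simp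
    rw [dif_neg hlen]
    rw [PySem.List.pyGet?_neg_one_append_singleton, PySem.List.slice_to_neg_one]
    simp only [List.dropLast_concat]
    by_cases he : e = []
    · subst he
      simp [pvSpecFun]
    · obtain ⟨x, xs, rfl⟩ : ∃ x xs, e = x :: xs := by
        cases e with
        | nil => exact absurd rfl he
        | cons a b => exact ⟨a, b, rfl⟩
      rw [if_neg (by simp), ih]
      simp only [pvSpecFun]
      by_cases hl : l.any (fun e => decide (e = [])) <;>
        by_cases hb : (base = "string" ∨ base = "bytes") ∧ (sub = none ∨ sub = some "") <;>
          simp [hl, hb, pvProdHeads, List.any_append, mul_comm, mul_left_comm]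

-- ===== VERDICT (by name: the statement is the Claim_ definition above) =====
theorem get_size_spec : Claim_equal_get_size := by
  intro typ _
  obtain ⟨base, sub, l⟩ := typ
  show get_size (base, sub, l) = get_size_alt (base, sub, l)
  rw [a_eq_spec, get_size_alt, alt_loop_eq_spec]
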